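-- pv_equiv track=rewrite | github.com/ahnhongjo/CodingTest | 코딩테스트_파이썬/level3/외벽 점검.py | cover_pos
-- ===== SOURCE A (Python) =====
-- import copy
--
-- def cover_pos(weak, order, n):
--     tmp = copy.deepcopy(weak)
--
--     for i in weak:
--         tmp.append(i + n)
--
--     for i in range(len(tmp) // 2):
--         order_num = 0
--         cover_cnt = 0
--         start = weak[i]
--         end = start + order[order_num]
--         order_num+=1
--         for j in tmp[i:]:
--             if cover_cnt == len(weak):
--                 return True
--             if j <= end:
--                 cover_cnt += 1
--                 continue
--             else:
--                 if order_num >= len(order):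
--                     break
--                 start = j
--                 end = start + order[order_num]
--                 cover_cnt += 1
--                 order_num += 1
--
--     return False
-- ===== SOURCE B (Python) =====
-- def _advance(ext, pos, lim, end):
--     while pos < lim and ext[pos] <= end:
--         pos += 1
--     return pos
--
-- def cover_pos(weak, order, n):
--     if not order:
--         return False
--     w = len(weak)
--     ext = weak + [x + n for x in weak]
--     for i in range(w):
--         lim = i + w
--         # friend 0 stands at weak[i] and walks while points stay within reach
--         pos = _advance(ext, i, lim, ext[i] + order[0])
--         if pos >= lim:
--             return True
--         for d in order[1:]:
--             # each dispatched friend handles the point it stands on, then walks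
--             pos = _advance(ext, pos + 1, lim, ext[pos] + d)
--             if pos >= lim:
--                 return True
--     return False
-- ===== Notes on version B (the rewrite author's own statement) =====
-- stated objective: alternative
-- what changed: A scans element-by-element per start over a fresh slice tmp[i:] with friend/counter bookkeeping; B is friend-major: per start it loops over the friends and advances an index pointer with a while-walk over the shared extended array, with no slicing, no deepcopy and no counters.
import Mathlib
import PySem

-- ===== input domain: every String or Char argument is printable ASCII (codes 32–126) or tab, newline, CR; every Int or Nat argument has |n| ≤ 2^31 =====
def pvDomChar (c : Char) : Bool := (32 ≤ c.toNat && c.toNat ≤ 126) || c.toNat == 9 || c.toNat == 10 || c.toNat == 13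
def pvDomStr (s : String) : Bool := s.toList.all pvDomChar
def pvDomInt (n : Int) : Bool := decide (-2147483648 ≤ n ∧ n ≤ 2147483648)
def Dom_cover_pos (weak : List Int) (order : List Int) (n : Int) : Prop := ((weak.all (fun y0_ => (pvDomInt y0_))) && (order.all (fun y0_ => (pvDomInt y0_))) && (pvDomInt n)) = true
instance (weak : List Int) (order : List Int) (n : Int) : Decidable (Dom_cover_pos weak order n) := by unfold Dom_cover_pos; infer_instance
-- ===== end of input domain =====

-- B is a friend-major rewrite of A's element-major scan: per start it advances an index
-- pointer over the shared extended array, one friend at a time; no slices, no counters.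

-- ===== PORT A =====
-- inner `for j in tmp[i:]` loop; state: order_num, cover_cnt, end
def aInner (wlen : Nat) (order : List Int) : List Int → Nat → Nat → Int → Bool
  | [], _, _, _ => false                                  -- loop ends: fall through to next i
  | j :: rest, orderNum, coverCnt, e =>
    if coverCnt = wlen then true
    else if j ≤ e then aInner wlen order rest orderNum (coverCnt + 1) e
    else if order.length ≤ orderNum then false            -- break
    else aInner wlen order rest (orderNum + 1) (coverCnt + 1) (j + order.getD orderNum 0)

def cover_pos (weak : List Int) (order : List Int) (n : Int) : Bool :=
  let tmp := weak ++ weak.map (· + n)                     -- deepcopy + appended i+n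
  (List.range (tmp.length / 2)).any (fun i =>             -- for i in range(len(tmp)//2), early return = any
    let start := weak.getD i 0                            -- weak[i]; i < len(weak) always here
    -- order[0]: raises IndexError iff order = [] (and weak ≠ []); excluded by Pre_
    aInner weak.length order (tmp.drop i) 1 0 (start + order.getD 0 0))  -- tmp[i:] with i ≥ 0 = drop i

-- ===== PORT B =====
-- while pos < lim and ext[pos] <= end: pos += 1
def bAdvance (ext : List Int) (lim : Nat) (e : Int) (pos : Nat) : Nat :=
  if pos < lim ∧ ext.getD pos 0 ≤ e then bAdvance ext lim e (pos + 1) else pos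
  termination_by lim - pos

-- for d in order[1:]: each dispatched friend handles its standing point, then walks
def bFriends (ext : List Int) (lim : Nat) : List Int → Nat → Bool
  | [], _ => false
  | d :: ds, pos =>
    let q := bAdvance ext lim (ext.getD pos 0 + d) (pos + 1)
    if lim ≤ q then true else bFriends ext lim ds q

def cover_pos_alt (weak : List Int) (order : List Int) (n : Int) : Bool :=
  if order.isEmpty then false
  else
    let w := weak.length
    let ext := weak ++ weak.map (· + n)
    (List.range w).any (fun i =>
      let q := bAdvance ext (i + w) (ext.getD i 0 + order.getD 0 0) i
      if i + w ≤ q then true else bFriends ext (i + w) (order.drop 1) q)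

-- ===== PRECONDITION & SPEC =====
-- Pre_ excludes exactly the inputs where A raises IndexError: nonempty weak with empty order.
def Pre_cover_pos (weak : List Int) (order : List Int) (n : Int) : Prop := weak = [] ∨ order ≠ []
instance (weak : List Int) (order : List Int) (n : Int) : Decidable (Pre_cover_pos weak order n) := by
  unfold Pre_cover_pos; infer_instance
def pvWitness_cover_pos : List Int × List Int × Int := ([1, 5, 6, 10], [1, 2, 3], 12)

def Spec_cover_pos (weak : List Int) (order : List Int) (n : Int) (out : Bool) : Prop := out = cover_pos_alt weak order n
instance (weak : List Int) (order : List Int) (n : Int) (out : Bool) : Decidable (Spec_cover_pos weak order n out) := by unfold Spec_cover_pos; infer_instance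

-- ===== CLAIM (what is proved, stated in full; the proofs are below) =====
def Claim_equal_cover_pos : Prop := ∀ (weak : List Int) (order : List Int) (n : Int), Dom_cover_pos weak order n → Pre_cover_pos weak order n → Spec_cover_pos weak order n (cover_pos weak order n)

-- ===== LEMMAS AND PROOFS =====

lemma any_congr_mem {α : Type} (l : List α) (f g : α → Bool) (h : ∀ x ∈ l, f x = g x) :
    l.any f = l.any g := by
  induction l with
  | nil => rfl
  | cons a t ih =>
    simp only [List.any_cons, h a (List.mem_cons_self), ih (fun x hx => h x (List.mem_cons_of_mem a hx))]

lemma bAdvance_stop (ext : List Int) (lim : Nat) (e : Int) (pos : Nat)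
    (h : ¬ (pos < lim ∧ ext.getD pos 0 ≤ e)) : bAdvance ext lim e pos = pos := by
  rw [bAdvance, if_neg h]

lemma bAdvance_step (ext : List Int) (lim : Nat) (e : Int) (pos : Nat)
    (h : pos < lim ∧ ext.getD pos 0 ≤ e) :
    bAdvance ext lim e pos = bAdvance ext lim e (pos + 1) := by
  conv_lhs => rw [bAdvance]
  rw [if_pos h]

-- main invariant: A's element-major scan from position p with next friend index k equals
-- B's "advance the pointer, then friend-major" view.
lemma main_inv (w i : Nat) (ext order : List Int) (hi : i < w) (hext : ext.length = 2 * w) :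
    ∀ t k, t = order.length - k → 1 ≤ k → k ≤ order.length →
    ∀ m p, m = i + w - p → i ≤ p → p ≤ i + w → ∀ e : Int,
      aInner w order (ext.drop p) k (p - i) e =
        (if i + w ≤ bAdvance ext (i + w) e p then true
         else bFriends ext (i + w) (order.drop k) (bAdvance ext (i + w) e p)) := by
  intro t
  induction t with
  | zero =>
    intro k ht hk1 hk2 m
    induction m with
    | zero =>
      intro p hm hip hpw e
      have hp : p = i + w := by omega
      have hplt : p < ext.length := by omega
      rw [List.drop_eq_getElem_cons hplt]
      simp only [aInner]
      rw [if_pos (by omega : p - i = w)]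
      rw [bAdvance_stop ext (i + w) e p (by omega)]
      rw [if_pos (by omega : i + w ≤ p)]
    | succ m ihm =>
      intro p hm hip hpw e
      have hplt : p < ext.length := by omega
      have hplt2 : p < i + w := by omega
      have hgd : ext.getD p 0 = ext[p] := List.getD_eq_getElem ext 0 hplt
      rw [List.drop_eq_getElem_cons hplt]
      simp only [aInner]
      rw [if_neg (by omega : ¬ p - i = w)]
      by_cases hle : ext[p] ≤ e
      · rw [if_pos hle, (by omega : p - i + 1 = p + 1 - i)]
        rw [ihm (p + 1) (by omega) (by omega) (by omega) e]
        rw [bAdvance_step ext (i + w) e p ⟨hplt2, by rw [hgd]; exact hle⟩]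
      · rw [if_neg hle]
        have hkeq : k = order.length := by omega
        rw [if_pos (by omega : order.length ≤ k)]
        rw [bAdvance_stop ext (i + w) e p (by rw [hgd]; exact fun hc => hle hc.2)]
        rw [if_neg (by omega : ¬ i + w ≤ p)]
        rw [List.drop_eq_nil_of_le (by omega : order.length ≤ k)]
        simp [bFriends]
  | succ t iht =>
    intro k ht hk1 hk2 m
    induction m with
    | zero =>
      intro p hm hip hpw e
      have hp : p = i + w := by omega
      have hplt : p < ext.length := by omega
      rw [List.drop_eq_getElem_cons hplt]
      simp only [aInner]
      rw [if_pos (by omega : p - i = w)]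
      rw [bAdvance_stop ext (i + w) e p (by omega)]
      rw [if_pos (by omega : i + w ≤ p)]
    | succ m ihm =>
      intro p hm hip hpw e
      have hplt : p < ext.length := by omega
      have hplt2 : p < i + w := by omega
      have hgd : ext.getD p 0 = ext[p] := List.getD_eq_getElem ext 0 hplt
      rw [List.drop_eq_getElem_cons hplt]
      simp only [aInner]
      rw [if_neg (by omega : ¬ p - i = w)]
      by_cases hle : ext[p] ≤ e
      · rw [if_pos hle, (by omega : p - i + 1 = p + 1 - i)]
        rw [ihm (p + 1) (by omega) (by omega) (by omega) e]
        rw [bAdvance_step ext (i + w) e p ⟨hplt2, by rw [hgd]; exact hle⟩]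
      · rw [if_neg hle]
        have hklt : k < order.length := by omega
        rw [if_neg (by omega : ¬ order.length ≤ k)]
        rw [(by omega : p - i + 1 = p + 1 - i)]
        rw [iht (k + 1) (by omega) (by omega) (by omega) (i + w - (p + 1)) (p + 1) rfl
            (by omega) (by omega) (ext[p] + order.getD k 0)]
        rw [bAdvance_stop ext (i + w) e p (by rw [hgd]; exact fun hc => hle hc.2)]
        rw [if_neg (by omega : ¬ i + w ≤ p)]
        rw [List.drop_eq_getElem_cons hklt]
        simp only [bFriends]
        rw [hgd, List.getD_eq_getElem order 0 hklt]

lemma per_start (weak order : List Int) (n : Int) (i : Nat) (hi : i < weak.length)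
    (hord : order ≠ []) :
    aInner weak.length order ((weak ++ weak.map (· + n)).drop i) 1 0
        (weak.getD i 0 + order.getD 0 0) =
      (let w := weak.length;
       let ext := weak ++ weak.map (· + n);
       let q := bAdvance ext (i + w) (ext.getD i 0 + order.getD 0 0) i;
       if i + w ≤ q then true else bFriends ext (i + w) (order.drop 1) q) := by
  simp only
  have hlen : (weak ++ weak.map (· + n)).length = 2 * weak.length := by simp; omega
  have hilt : i < (weak ++ weak.map (· + n)).length := by omega
  have hw : weak.getD i 0 = (weak ++ weak.map (· + n)).getD i 0 := by
    rw [List.getD_eq_getElem weak 0 hi, List.getD_eq_getElem _ 0 hilt]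
    simp [hi]
  have hlen1 : 1 ≤ order.length := by
    cases order with
    | nil => exact absurd rfl hord
    | cons a t => simp
  rw [hw]
  have := main_inv weak.length i (weak ++ weak.map (· + n)) order hi hlen
    (order.length - 1) 1 rfl le_rfl hlen1
    (i + weak.length - i) i rfl le_rfl (by omega)
    ((weak ++ weak.map (· + n)).getD i 0 + order.getD 0 0)
  simpa using this

-- ===== VERDICT (by name: the statement is the Claim_ definition above) =====
theorem cover_pos_spec : Claim_equal_cover_pos := by
  intro weak order n _ hpre
  unfold Spec_cover_pos cover_pos cover_pos_alt
  cases hw : weak with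
  | nil => cases order <;> simp
  | cons a t =>
    have hord : order ≠ [] := by
      rcases hpre with h | h
      · rw [hw] at h; exact absurd h (by simp)
      · exact h
    rw [if_neg (by simpa [List.isEmpty_iff] using hord)]
    rw [← hw]
    have hlen : ((weak ++ weak.map (· + n)).length) / 2 = weak.length := by
      simp; omega
    simp only [hlen]
    apply any_congr_mem
    intro i hi
    have hi' : i < weak.length := List.mem_range.mp hi
    exact per_start weak order n i hi' hord
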